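-- pv_equiv track=rewrite | github.com/qiqiguana/candor | 147.py | faulty_process_and_sum
-- ===== SOURCE A (Python) =====
-- def faulty_process_and_sum(lst):
--     result = []
--     for i, val in enumerate(lst):
--         if i % 3 == 0:
--             result.append(val ** 2)
--         elif i % 5 == 0 and i % 3 != 0:
--             result.append(val ** 3)
--         else:
--             result.append(val)
--     return sum(result)
-- ===== SOURCE B (Python) =====
-- def faulty_process_and_sum(lst):
--     # base sum plus two strided correction passes (multiples of 3 squared,
--     # remaining multiples of 5 cubed)
--     total = sum(lst)
--     n = len(lst)
--     for i in range(0, n, 3):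
--         v = lst[i]
--         total += v * v - v
--     for i in range(0, n, 5):
--         if i % 3 != 0:
--             v = lst[i]
--             total += v * v * v - v
--     return total
-- ===== Notes on version B (the rewrite author's own statement) =====
-- stated objective: faster
-- what changed: Replaces the single branchy indexed pass that builds an intermediate list with a base sum of the whole list plus two strided correction loops (step 3 adds v*v-v, step 5 adds v**3-v for indices not divisible by 3), so no intermediate list and no per-element branching.
import Mathlib
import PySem

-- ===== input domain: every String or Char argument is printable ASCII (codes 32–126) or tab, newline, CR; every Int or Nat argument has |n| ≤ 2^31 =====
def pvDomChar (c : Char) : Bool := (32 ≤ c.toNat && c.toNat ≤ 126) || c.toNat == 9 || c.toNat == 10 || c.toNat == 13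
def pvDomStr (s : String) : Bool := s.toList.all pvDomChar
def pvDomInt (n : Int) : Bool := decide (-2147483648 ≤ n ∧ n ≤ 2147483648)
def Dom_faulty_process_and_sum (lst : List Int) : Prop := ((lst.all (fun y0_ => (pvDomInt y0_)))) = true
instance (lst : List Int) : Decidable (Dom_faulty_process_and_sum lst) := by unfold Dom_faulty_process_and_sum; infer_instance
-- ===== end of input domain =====

-- B replaces A's single branchy indexed pass (building an intermediate list) by the base
-- sum of the list plus two strided correction loops: no intermediate list, fewer branches.


-- ===== PORT A =====
def faulty_process_and_sum (lst : List Int) : Int :=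
  let result := (PySem.List.enumerate lst 0).foldl (fun r iv =>
    if PySem.Int.mod iv.1 3 = 0 then r ++ [iv.2 ^ 2]
    else if PySem.Int.mod iv.1 5 = 0 ∧ ¬ PySem.Int.mod iv.1 3 = 0 then r ++ [iv.2 ^ 3]
    else r ++ [iv.2]) ([] : List Int)
  result.sum

-- ===== PORT B =====
def faulty_process_and_sum_alt (lst : List Int) : Int :=
  let total0 := lst.sum
  let n : Int := lst.length
  let total1 := (PySem.List.pyRange 0 n 3).foldl
    (fun t i =>
      let v := PySem.List.pyGetD lst i 0
      t + (v * v - v)) total0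
  (PySem.List.pyRange 0 n 5).foldl
    (fun t i =>
      if ¬ PySem.Int.mod i 3 = 0 then
        let v := PySem.List.pyGetD lst i 0
        t + (v * v * v - v)
      else t) total1

-- ===== PRECONDITION & SPEC =====
def Spec_faulty_process_and_sum (lst : List Int) (out : Int) : Prop := out = faulty_process_and_sum_alt lst
instance (lst : List Int) (out : Int) : Decidable (Spec_faulty_process_and_sum lst out) := by unfold Spec_faulty_process_and_sum; infer_instance

-- ===== CLAIM (what is proved, stated in full; the proofs are below) =====
def Claim_equal_faulty_process_and_sum : Prop := ∀ (lst : List Int), Dom_faulty_process_and_sum lst → Spec_faulty_process_and_sum lst (faulty_process_and_sum lst)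

-- ===== LEMMAS AND PROOFS =====

-- per-index value A appends (Nat index form)
def gN (k : Nat) (v : Int) : Int :=
  if k % 3 = 0 then v ^ 2 else if k % 5 = 0 then v ^ 3 else v

-- per-index value A appends (Int index form, as the port computes it)
def gI (i : Int) (v : Int) : Int :=
  if PySem.Int.mod i 3 = 0 then v ^ 2 else if PySem.Int.mod i 5 = 0 then v ^ 3 else v

lemma enum_sum (t : List Int) : ∀ s : Nat,
    ((PySem.List.enumerate t (s:Int)).map (fun iv => gI iv.1 iv.2)).sum
      = ((List.range t.length).map (fun k => gN (s + k) (t.getD k 0))).sum := by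
  induction t with
  | nil => intro s; simp [PySem.List.enumerate]
  | cons v t ih =>
    intro s
    rw [PySem.List.enumerate_cons]
    have hcast : (s:Int) + 1 = ((s+1 : Nat) : Int) := by push_cast; ring
    rw [List.map_cons, List.sum_cons, hcast, ih (s+1)]
    rw [List.length_cons, List.range_succ_eq_map, List.map_cons, List.sum_cons, List.map_map]
    have hg : gI (s:Int) v = gN s v := by
      simp only [gI, gN, PySem.Int.mod_eq_zero_iff_dvd]
      split_ifs with h1 h2 h3 h4 h5 <;> first | rfl | (exfalso; omega)
    have htail : List.map ((fun k => gN (s + k) ((v :: t).getD k 0)) ∘ Nat.succ) (List.range t.length)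
        = List.map (fun k => gN (s + 1 + k) (t.getD k 0)) (List.range t.length) := by
      refine List.map_congr_left ?_
      intro k _
      simp only [Function.comp, List.getD_cons_succ]
      congr 1
      omega
    rw [htail]
    simp [hg]

-- A's result as a sum over indices
lemma A_eq (lst : List Int) :
    faulty_process_and_sum lst
      = ((List.range lst.length).map (fun k => gN k (lst.getD k 0))).sum := by
  show (((PySem.List.enumerate lst 0).foldl (fun r iv =>
    if PySem.Int.mod iv.1 3 = 0 then r ++ [iv.2 ^ 2]
    else if PySem.Int.mod iv.1 5 = 0 ∧ ¬ PySem.Int.mod iv.1 3 = 0 then r ++ [iv.2 ^ 3]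
    else r ++ [iv.2]) ([] : List Int)).sum) = _
  rw [PySem.List.foldl_congr_mem _ _ (fun r iv => r ++ [gI iv.1 iv.2]) _ (by
    intro acc iv _
    simp only [gI]
    split_ifs with h1 h2 h3 h4 <;> simp_all)]
  rw [PySem.List.foldl_append_singleton_eq_map, List.nil_append]
  have := enum_sum lst 0
  simpa using this

-- strided sum (step 3) as a conditional full-range sum
lemma stride3 (f : Nat → Int) (n : Nat) :
    ((List.range ((n + 2) / 3)).map (fun k => f (3 * k))).sum
      = ((List.range n).map (fun i => if i % 3 = 0 then f i else 0)).sum := by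
  induction n with
  | zero => simp
  | succ n ih =>
    rw [List.range_succ, List.map_append, List.sum_append]
    by_cases h : n % 3 = 0
    · have hm : (n + 1 + 2) / 3 = (n + 2) / 3 + 1 := by omega
      have h3m : 3 * ((n + 2) / 3) = n := by omega
      rw [hm, List.range_succ, List.map_append, List.sum_append, ih]
      simp [h, h3m]
    · have hm : (n + 1 + 2) / 3 = (n + 2) / 3 := by omega
      rw [hm, ih]
      simp [h]

-- strided sum (step 5) as a conditional full-range sum
lemma stride5 (f : Nat → Int) (n : Nat) :
    ((List.range ((n + 4) / 5)).map (fun k => f (5 * k))).sum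
      = ((List.range n).map (fun i => if i % 5 = 0 then f i else 0)).sum := by
  induction n with
  | zero => simp
  | succ n ih =>
    rw [List.range_succ, List.map_append, List.sum_append]
    by_cases h : n % 5 = 0
    · have hm : (n + 1 + 4) / 5 = (n + 4) / 5 + 1 := by omega
      have h5m : 5 * ((n + 4) / 5) = n := by omega
      rw [hm, List.range_succ, List.map_append, List.sum_append, ih]
      simp [h, h5m]
    · have hm : (n + 1 + 4) / 5 = (n + 4) / 5 := by omega
      rw [hm, ih]
      simp [h]

lemma sum_getD_range (l : List Int) :
    ((List.range l.length).map (fun i => l.getD i 0)).sum = l.sum := by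
  congr 1
  induction l with
  | nil => simp
  | cons x t ih =>
    rw [List.length_cons, List.range_succ_eq_map, List.map_cons, List.map_map]
    simpa [Function.comp] using ih

lemma range_count3 (n : Nat) :
    (if (0:Int) < (n:Int) then (((n:Int) - 0 + 3 - 1)/3).toNat else 0) = (n + 2)/3 := by
  split <;> omega

lemma range_count5 (n : Nat) :
    (if (0:Int) < (n:Int) then (((n:Int) - 0 + 5 - 1)/5).toNat else 0) = (n + 4)/5 := by
  split <;> omega

-- B's result as a sum over indices
lemma B_eq (lst : List Int) :
    faulty_process_and_sum_alt lst
      = ((List.range lst.length).map (fun i =>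
          lst.getD i 0
          + (if i % 3 = 0 then lst.getD i 0 * lst.getD i 0 - lst.getD i 0 else 0)
          + (if i % 5 = 0 then
              (if ¬ i % 3 = 0 then lst.getD i 0 * lst.getD i 0 * lst.getD i 0 - lst.getD i 0 else 0)
             else 0))).sum := by
  simp only [faulty_process_and_sum_alt]
  rw [PySem.List.foldl_congr_mem _ _ (fun t i => t + (if ¬ PySem.Int.mod i 3 = 0 then
        PySem.List.pyGetD lst i 0 * PySem.List.pyGetD lst i 0 * PySem.List.pyGetD lst i 0
          - PySem.List.pyGetD lst i 0 else 0)) _ (by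
    intro acc i _
    by_cases h : (3:Int) ∣ i <;> simp [h])]
  rw [PySem.List.foldl_add, PySem.List.foldl_add]
  rw [PySem.List.pyRange_of_pos 0 ((lst.length : Nat) : Int) (by norm_num : (0:Int) < 3),
      PySem.List.pyRange_of_pos 0 ((lst.length : Nat) : Int) (by norm_num : (0:Int) < 5)]
  rw [range_count3 lst.length, range_count5 lst.length, List.map_map, List.map_map]
  have e3 : List.map ((fun i => PySem.List.pyGetD lst i 0 * PySem.List.pyGetD lst i 0
        - PySem.List.pyGetD lst i 0) ∘ fun k : Nat => (0:Int) + 3 * (k:Int))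
        (List.range ((lst.length + 2) / 3))
      = List.map (fun k => lst.getD (3*k) 0 * lst.getD (3*k) 0 - lst.getD (3*k) 0)
        (List.range ((lst.length + 2) / 3)) := by
    refine List.map_congr_left ?_
    intro k _
    have hc : (0:Int) + 3 * (k:Int) = ((3*k : Nat) : Int) := by push_cast; ring
    simp only [Function.comp_apply, hc, PySem.List.pyGetD_natCast]
  have e5 : List.map ((fun i => if ¬ PySem.Int.mod i 3 = 0 then
        PySem.List.pyGetD lst i 0 * PySem.List.pyGetD lst i 0 * PySem.List.pyGetD lst i 0
          - PySem.List.pyGetD lst i 0 else 0) ∘ fun k : Nat => (0:Int) + 5 * (k:Int))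
        (List.range ((lst.length + 4) / 5))
      = List.map (fun k => if ¬ (5*k) % 3 = 0 then
          lst.getD (5*k) 0 * lst.getD (5*k) 0 * lst.getD (5*k) 0 - lst.getD (5*k) 0 else 0)
        (List.range ((lst.length + 4) / 5)) := by
    refine List.map_congr_left ?_
    intro k _
    have hc : (0:Int) + 5 * (k:Int) = ((5*k : Nat) : Int) := by push_cast; ring
    have hm : PySem.Int.mod ((5*k : Nat) : Int) 3 = (((5*k) % 3 : Nat) : Int) := by
      exact_mod_cast PySem.Int.mod_natCast (5*k) 3
    simp only [Function.comp_apply, hc, hm, Nat.cast_eq_zero, PySem.List.pyGetD_natCast]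
  rw [e3, e5,
      stride3 (fun i => lst.getD i 0 * lst.getD i 0 - lst.getD i 0) lst.length,
      stride5 (fun i => if ¬ i % 3 = 0 then
        lst.getD i 0 * lst.getD i 0 * lst.getD i 0 - lst.getD i 0 else 0) lst.length,
      ← sum_getD_range lst, ← PySem.List.sum_map_add_int, ← PySem.List.sum_map_add_int]

-- ===== VERDICT (by name: the statement is the Claim_ definition above) =====
theorem faulty_process_and_sum_spec : Claim_equal_faulty_process_and_sum := by
  intro lst _
  show faulty_process_and_sum lst = faulty_process_and_sum_alt lst
  rw [A_eq, B_eq]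
  refine congrArg List.sum (List.map_congr_left ?_)
  intro i _
  simp only [gN]
  split_ifs with h3 h5 h5' <;> ring
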